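-- pv_equiv track=rewrite | github.com/anthonytsmith22/R6LevelCalc | Calculation.py | get_xp2
-- ===== SOURCE A (Python) =====
-- def get_xp2(level):
--     counter = 0
--     xp_requirement = 0
--     for x in range(level):
--         if x == 0:
--             xp_requirement = 1000
--         elif x == 1:
--             xp_requirement = 1500
--         elif x == 2 or x == 3:
--             xp_requirement = 3500
--         elif x == 4 or x == 5:
--             xp_requirement = 4000
--         elif 6 <= x <= 8:
--             xp_requirement = 4500
--         elif x == 9 or x == 10:
--             xp_requirement = 5500
--         if 9 <= x < 37:
--             counter += 1
--             if counter == 3: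
--                 xp_requirement += 500
--                 counter = 0
--         elif x == 38 or x == 39:
--             xp_requirement = 11000
--         elif x >= 40:
--             xp_requirement += 500
--     return xp_requirement
-- ===== SOURCE B (Python) =====
-- def get_xp2(level):
--     x = level - 1
--     if x < 0:
--         return 0
--     if x >= 40:
--         return 11000 + 500 * (x - 39)
--     if x >= 38:
--         return 11000
--     if x >= 10:
--         return 5500 + 500 * ((x - 8) // 3)
--     if x == 0:
--         return 1000
--     if x == 1:
--         return 1500
--     if x <= 3:
--         return 3500
--     if x <= 5:
--         return 4000
--     if x <= 8:
--         return 4500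
--     return 5500
-- ===== Notes on version B (the rewrite author's own statement) =====
-- stated objective: faster
-- what changed: Replaced A's linear loop over range(level) carrying a mod-3 counter with a constant-time closed-form piecewise formula in x = level-1, using floor division for the every-three-levels increment band.
import Mathlib
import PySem

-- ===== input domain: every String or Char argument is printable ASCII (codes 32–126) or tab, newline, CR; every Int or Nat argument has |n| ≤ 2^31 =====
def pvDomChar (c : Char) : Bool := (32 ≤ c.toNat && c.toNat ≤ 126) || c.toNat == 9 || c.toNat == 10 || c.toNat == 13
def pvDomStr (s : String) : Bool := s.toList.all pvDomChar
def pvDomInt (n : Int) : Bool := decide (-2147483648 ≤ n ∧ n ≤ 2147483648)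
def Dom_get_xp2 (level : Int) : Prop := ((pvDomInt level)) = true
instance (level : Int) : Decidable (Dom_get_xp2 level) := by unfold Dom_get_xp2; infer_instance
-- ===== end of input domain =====

-- B replaces A's O(level) loop with a closed-form piecewise formula in x = level-1 (O(1)).

-- ===== PORT A =====
-- one loop iteration of A: state (counter, xp_requirement), loop variable x
def get_xp2_step (st : Int × Int) (x : Int) : Int × Int :=
  let counter := st.1
  let xp0 := st.2
  let xp1 :=
    if x = 0 then 1000
    else if x = 1 then 1500
    else if x = 2 ∨ x = 3 then 3500
    else if x = 4 ∨ x = 5 then 4000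
    else if 6 ≤ x ∧ x ≤ 8 then 4500
    else if x = 9 ∨ x = 10 then 5500
    else xp0
  if 9 ≤ x ∧ x < 37 then
    let c := counter + 1
    if c = 3 then (0, xp1 + 500) else (c, xp1)
  else if x = 38 ∨ x = 39 then (counter, 11000)
  else if x ≥ 40 then (counter, xp1 + 500)
  else (counter, xp1)

def get_xp2 (level : Int) : Int :=
  ((PySem.List.pyRange 0 level 1).foldl get_xp2_step (0, 0)).2

-- ===== PORT B =====
def get_xp2_alt (level : Int) : Int :=
  let x := level - 1
  if x < 0 then 0
  else if x ≥ 40 then 11000 + 500 * (x - 39)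
  else if x ≥ 38 then 11000
  else if x ≥ 10 then 5500 + 500 * (PySem.Int.floordiv (x - 8) 3)
  else if x = 0 then 1000
  else if x = 1 then 1500
  else if x ≤ 3 then 3500
  else if x ≤ 5 then 4000
  else if x ≤ 8 then 4500
  else 5500

-- ===== PRECONDITION & SPEC =====
def Spec_get_xp2 (level : Int) (out : Int) : Prop := out = get_xp2_alt level
instance (level : Int) (out : Int) : Decidable (Spec_get_xp2 level out) := by unfold Spec_get_xp2; infer_instance

-- ===== CLAIM (what is proved, stated in full; the proofs are below) =====
def Claim_equal_get_xp2 : Prop := ∀ (level : Int), Dom_get_xp2 level → Spec_get_xp2 level (get_xp2 level)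

-- ===== LEMMAS AND PROOFS =====

-- A's step for x ≥ 40 just adds 500 to the xp component
theorem get_xp2_step_ge40 (c xp x : Int) (hx : 40 ≤ x) :
    get_xp2_step (c, xp) x = (c, xp + 500) := by
  unfold get_xp2_step
  simp only
  split_ifs with h1 h2 h3 h4 h5 h6 h7 h8 h9 <;> first | rfl | omega

-- loop state after the full range for levels 40 + k
theorem get_xp2_loop_big (k : Nat) :
    (PySem.List.pyRange 0 (40 + (k : Int)) 1).foldl get_xp2_step (0, 0)
      = (1, 11000 + 500 * (k : Int)) := by
  induction k with
  | zero => decide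
  | succ n ih =>
      have h : PySem.List.pyRange 0 (40 + ((n : Int) + 1)) 1
          = PySem.List.pyRange 0 (40 + (n : Int)) 1 ++ [40 + (n : Int)] := by
        have := PySem.List.pyRange_one_succ_right (a := 0) (b := 40 + (n : Int)) (by omega)
        rw [show (40 : Int) + ((n : Int) + 1) = (40 + (n : Int)) + 1 by ring, this]
      push_cast
      rw [h, List.foldl_append]
      push_cast at ih
      rw [ih]
      simp only [List.foldl]
      rw [get_xp2_step_ge40 _ _ _ (by omega)]
      ring_nf

theorem get_xp2_small (n : Nat) (h : n ≤ 41) : get_xp2 (n : Int) = get_xp2_alt (n : Int) := by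
  interval_cases n <;> decide

-- ===== VERDICT (by name: the statement is the Claim_ definition above) =====
theorem get_xp2_spec : Claim_equal_get_xp2 := by
  intro level _
  show get_xp2 level = get_xp2_alt level
  rcases le_or_gt level 41 with hle | hgt
  · rcases le_or_gt level 0 with h0 | hpos
    · have : PySem.List.pyRange 0 level 1 = [] :=
        PySem.List.pyRange_one_eq_nil (by omega)
      unfold get_xp2 get_xp2_alt
      rw [this]
      simp only [List.foldl]
      split_ifs with h1 <;> first | rfl | omega
    · obtain ⟨n, rfl⟩ : ∃ n : Nat, level = (n : Int) :=
        ⟨level.toNat, (Int.toNat_of_nonneg (by omega)).symm⟩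
      exact get_xp2_small n (by omega)
  · obtain ⟨k, hk⟩ : ∃ k : Nat, level = 40 + (k : Int) :=
      ⟨(level - 40).toNat, by omega⟩
    have hk2 : 2 ≤ (k : Int) := by omega
    subst hk
    unfold get_xp2
    rw [get_xp2_loop_big]
    unfold get_xp2_alt
    simp only
    rw [if_neg (by omega), if_pos (by omega : (40:Int) + (k:Int) - 1 ≥ 40)]
    ring_nf
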